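-- pv_equiv track=rewrite | github.com/kimnamhyeong01/sk-python-projects | codelab/day2_codelab_1.py | _make_samples
-- ===== SOURCE A (Python) =====
-- from typing import List, Tuple
--
-- def _make_samples(n: int) -> List[str]:
--     """
--     벤치마크용 샘플 리뷰 생성.
--     이메일·전화번호·금칙어를 균형 있게 포함하여 Regex 부하를 현실적으로 재현.
--     """
--     templates = [
--         "이 제품 정말 바보 같아요. 환불 문의: refund@example.com",
--         "배송이 쓰레기야. 연락처 010-1234-5678로 연락주세요.",
--         "최악의 서비스입니다. 다시는 안 삽니다.",
--         "품질이 형편없어요. 이메일 user@shop.co.kr 남깁니다.",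
--         "정말 좋아요! 강력 추천합니다.",
--         "멍청이 같은 디자인이네요. +82-10-9876-5432 문의 바랍니다.",
--     ]
--     return [templates[i % len(templates)] for i in range(n)]
-- ===== SOURCE B (Python) =====
-- from typing import List
--
-- def _make_samples(n: int) -> List[str]:
--     templates = [
--         "이 제품 정말 바보 같아요. 환불 문의: refund@example.com",
--         "배송이 쓰레기야. 연락처 010-1234-5678로 연락주세요.",
--         "최악의 서비스입니다. 다시는 안 삽니다.",
--         "품질이 형편없어요. 이메일 user@shop.co.kr 남깁니다.",
--         "정말 좋아요! 강력 추천합니다.",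
--         "멍청이 같은 디자인이네요. +82-10-9876-5432 문의 바랍니다.",
--     ]
--     return (templates * (n // len(templates) + 1))[:n]
-- ===== Notes on version B (the rewrite author's own statement) =====
-- stated objective: idiomatic
-- what changed: Replaces the per-index modular-lookup comprehension with whole-list replication (templates * (n//6 + 1)) followed by a slice [:n]; no per-element index arithmetic remains.
import Mathlib
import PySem

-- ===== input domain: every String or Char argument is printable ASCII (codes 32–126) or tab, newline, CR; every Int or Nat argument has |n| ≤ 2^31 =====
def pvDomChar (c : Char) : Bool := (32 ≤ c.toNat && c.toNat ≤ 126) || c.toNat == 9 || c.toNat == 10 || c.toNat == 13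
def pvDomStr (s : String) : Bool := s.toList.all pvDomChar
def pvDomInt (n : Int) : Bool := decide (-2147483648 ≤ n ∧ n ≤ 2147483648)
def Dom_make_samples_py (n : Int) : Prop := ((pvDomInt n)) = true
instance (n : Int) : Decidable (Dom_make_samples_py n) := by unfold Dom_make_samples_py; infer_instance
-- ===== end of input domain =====

-- B builds the list by whole-list replication and a slice instead of A's per-index modular lookup (idiomatic; same cost).

-- ===== PORT A =====
def pvTemplatesA : List String :=
  [ "이 제품 정말 바보 같아요. 환불 문의: refund@example.com",
    "배송이 쓰레기야. 연락처 010-1234-5678로 연락주세요.",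
    "최악의 서비스입니다. 다시는 안 삽니다.",
    "품질이 형편없어요. 이메일 user@shop.co.kr 남깁니다.",
    "정말 좋아요! 강력 추천합니다.",
    "멍청이 같은 디자인이네요. +82-10-9876-5432 문의 바랍니다." ]

-- [templates[i % len(templates)] for i in range(n)]  (the index i % 6 is always in range, so pyGetD's default is never used)
def make_samples_py (n : Int) : List String :=
  (PySem.List.pyRange 0 n 1).map
    (fun i => PySem.List.pyGetD pvTemplatesA (PySem.Int.mod i (pvTemplatesA.length : Int)) "")

-- ===== PORT B =====
def pvTemplatesB : List String :=
  [ "이 제품 정말 바보 같아요. 환불 문의: refund@example.com",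
    "배송이 쓰레기야. 연락처 010-1234-5678로 연락주세요.",
    "최악의 서비스입니다. 다시는 안 삽니다.",
    "품질이 형편없어요. 이메일 user@shop.co.kr 남깁니다.",
    "정말 좋아요! 강력 추천합니다.",
    "멍청이 같은 디자인이네요. +82-10-9876-5432 문의 바랍니다." ]

-- (templates * (n // len(templates) + 1))[:n]   (list * k with k ≤ 0 is []; slicing matches Python's [:n])
def make_samples_py_alt (n : Int) : List String :=
  PySem.List.slice
    ((List.replicate (PySem.Int.floordiv n (pvTemplatesB.length : Int) + 1).toNat pvTemplatesB).flatten)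
    none (some n)

-- ===== PRECONDITION & SPEC =====
def Spec_make_samples_py (n : Int) (out : List String) : Prop := out = make_samples_py_alt n
instance (n : Int) (out : List String) : Decidable (Spec_make_samples_py n out) := by unfold Spec_make_samples_py; infer_instance

-- ===== CLAIM (what is proved, stated in full; the proofs are below) =====
def Claim_equal_make_samples_py : Prop := ∀ (n : Int), Dom_make_samples_py n → Spec_make_samples_py n (make_samples_py n)

-- ===== LEMMAS AND PROOFS =====

-- indexing into the flattened replication is cyclic indexing into the block
lemma pv_flat_get (c j : Nat) (h : j < 6 * c) :
    ((List.replicate c pvTemplatesB).flatten)[j]? = pvTemplatesB[j % 6]? := by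
  induction c generalizing j with
  | zero => omega
  | succ c ih =>
    rw [List.replicate_succ, List.flatten_cons, List.getElem?_append]
    by_cases hj : j < 6
    · simp [pvTemplatesB, hj, Nat.mod_eq_of_lt hj]
    · have h6 : pvTemplatesB.length = 6 := by decide
      rw [if_neg (by omega), h6, ih (j - 6) (by omega)]
      congr 1
      omega

theorem make_samples_py_spec : Claim_equal_make_samples_py := by
  intro n _
  unfold Spec_make_samples_py make_samples_py make_samples_py_alt
  have hlenA : (pvTemplatesA.length : Int) = 6 := by decide
  have hlenB : (pvTemplatesB.length : Int) = 6 := by decide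
  rw [hlenA, hlenB]
  by_cases hn : 0 ≤ n
  · -- n ≥ 0 : write n as a natural number m
    obtain ⟨m, rfl⟩ := Int.eq_ofNat_of_zero_le hn
    rw [PySem.List.slice_to _ (Int.natCast_nonneg m)]
    have hfd : PySem.Int.floordiv (m : Int) 6 = ((m / 6 : Nat) : Int) := by
      exact_mod_cast PySem.Int.floordiv_natCast m 6
    rw [hfd]
    have hcnt : (((m / 6 : Nat) : Int) + 1).toNat = m / 6 + 1 := by omega
    have htoNat : ((m : Int)).toNat = m := by omega
    rw [hcnt, htoNat]
    -- both sides elementwise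
    apply List.ext_getElem?
    intro j
    by_cases hj : j < m
    · rw [List.getElem?_take, if_pos hj]
      have hA : (PySem.List.pyRange 0 (m : Int) 1)[j]? = some ((0 : Int) + j) := by
        rw [PySem.List.getElem?_pyRange_one, if_pos (by omega)]
      rw [List.getElem?_map, hA, pv_flat_get (m / 6 + 1) j (by omega)]
      have hmod : PySem.Int.mod ((0 : Int) + j) 6 = ((j % 6 : Nat) : Int) := by
        rw [zero_add]; exact_mod_cast PySem.Int.mod_natCast j 6
      have hb0 : (0:Int) ≤ ((j % 6 : Nat) : Int) := by positivity
      have hb1 : ((j % 6 : Nat) : Int) < (pvTemplatesB.length : Int) := by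
        have : j % 6 < 6 := Nat.mod_lt _ (by omega)
        omega
      have hAB : pvTemplatesA = pvTemplatesB := by rfl
      simp only [Option.map_some, hmod, hAB]
      have hlt : j % 6 < pvTemplatesB.length := by
        have : j % 6 < 6 := Nat.mod_lt _ (by omega)
        simpa [pvTemplatesB] using this
      rw [List.getElem?_eq_getElem hlt, PySem.List.pyGetD_eq_getElem pvTemplatesB "" hb0 hb1]
      congr 1
    · -- past the end: both none
      rw [List.getElem?_take, if_neg hj, List.getElem?_map]
      have : (PySem.List.pyRange 0 (m : Int) 1).length ≤ j := by
        rw [PySem.List.length_pyRange_one]; omega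
      rw [List.getElem?_eq_none this]
      rfl
  · -- n < 0 : both sides are []
    push Not at hn
    rw [PySem.List.pyRange_one_eq_nil (by omega)]
    have hcnt : (PySem.Int.floordiv n 6 + 1).toNat = 0 := by
      have h1 : PySem.Int.floordiv n 6 * 6 + PySem.Int.mod n 6 = n := PySem.Int.floordiv_mul_add_mod n 6
      have h2 : 0 ≤ PySem.Int.mod n 6 := PySem.Int.mod_nonneg n (by omega)
      have h3 : PySem.Int.mod n 6 < 6 := PySem.Int.mod_lt n (by omega)
      omega
    rw [hcnt]
    simp [PySem.List.slice]
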